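-- pv_equiv track=rewrite | github.com/ashzak/servicenow-compliance-scanner | opa_policy_engine.py | _generate_remediation_text
-- ===== SOURCE A (Python) =====
-- from typing import Dict, List, Optional, Any
--
-- def _generate_remediation_text(remediation_actions: List[Dict[str, Any]]) -> str:
--     """Generate remediation text from policy actions"""
--
--     if not remediation_actions:
--         return "No remediation required - system is compliant"
--
--     # Sort by priority
--     priority_order = {"P1_CRITICAL": 1, "P2_HIGH": 2, "P3_MEDIUM": 3, "P4_LOW": 4}
--
--     sorted_actions = sorted(
--         remediation_actions,
--         key=lambda x: priority_order.get(x.get("priority", "P4_LOW"), 5)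
--     )
--
--     remediation_text = "Remediation Required:\n"
--
--     for i, action in enumerate(sorted_actions[:5], 1):  # Limit to top 5
--         priority = action.get("priority", "")
--         description = action.get("description", "")
--         timeline = action.get("timeline", "")
--
--         remediation_text += f"{i}. [{priority}] {description}"
--         if timeline:
--             remediation_text += f" (Timeline: {timeline})"
--         remediation_text += "\n"
--
--     if len(remediation_actions) > 5:
--         remediation_text += f"... and {len(remediation_actions) - 5} more actions\n"
--
--     return remediation_text.strip()
-- ===== SOURCE B (Python) =====
-- def _generate_remediation_text(remediation_actions):
--     """Generate remediation text from policy actions (bucket ordering, no sort)."""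
--
--     if not remediation_actions:
--         return "No remediation required - system is compliant"
--
--     priority_order = {"P1_CRITICAL": 1, "P2_HIGH": 2, "P3_MEDIUM": 3, "P4_LOW": 4}
--
--     # Stable bucket pass: one scan, five buckets by priority rank.
--     b1, b2, b3, b4, b5 = [], [], [], [], []
--     for action in remediation_actions:
--         rank = priority_order.get(action.get("priority", "P4_LOW"), 5)
--         if rank == 1:
--             b1.append(action)
--         elif rank == 2:
--             b2.append(action)
--         elif rank == 3:
--             b3.append(action)
--         elif rank == 4:
--             b4.append(action)
--         else:
--             b5.append(action)
--     ordered = b1 + b2 + b3 + b4 + b5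
--
--     def format_line(i, action):
--         line = f"{i}. [{action.get('priority', '')}] {action.get('description', '')}"
--         timeline = action.get("timeline", "")
--         if timeline:
--             line += f" (Timeline: {timeline})"
--         return line + "\n"
--
--     lines = [format_line(i, a) for i, a in enumerate(ordered[:5], 1)]
--     text = "Remediation Required:\n" + "".join(lines)
--
--     if len(remediation_actions) > 5:
--         text += f"... and {len(remediation_actions) - 5} more actions\n"
--
--     return text.strip()
-- ===== Notes on version B (the rewrite author's own statement) =====
-- stated objective: alternative
-- what changed: Replaces sorted(..., key=rank) with one stable bucket pass (five rank buckets concatenated in order) and builds the report by joining formatted lines instead of accumulating into a string with a running counter.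
import Mathlib
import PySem

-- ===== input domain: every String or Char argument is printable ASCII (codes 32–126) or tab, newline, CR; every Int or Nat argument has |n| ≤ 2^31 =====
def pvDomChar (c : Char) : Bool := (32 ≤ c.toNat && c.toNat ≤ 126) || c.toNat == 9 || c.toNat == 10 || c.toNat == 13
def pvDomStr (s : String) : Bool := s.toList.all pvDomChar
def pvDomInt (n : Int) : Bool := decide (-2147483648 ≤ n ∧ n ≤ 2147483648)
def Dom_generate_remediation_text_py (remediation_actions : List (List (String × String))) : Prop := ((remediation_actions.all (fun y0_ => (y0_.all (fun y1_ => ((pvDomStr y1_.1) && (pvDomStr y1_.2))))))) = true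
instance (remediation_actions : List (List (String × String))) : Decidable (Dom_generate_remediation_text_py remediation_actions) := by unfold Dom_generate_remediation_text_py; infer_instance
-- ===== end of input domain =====

-- B replaces the sorted(..., key=rank) call with a single stable bucket pass (five buckets
-- concatenated in rank order) and builds the report by joining formatted lines; same output.

-- dict.get(k, dflt) on an association list (first match), shared by both ports
def pvGet (d : List (String × String)) (k dflt : String) : String :=
  match d.find? (fun p => p.1 == k) with
  | some p => p.2
  | none => dflt

-- priority_order.get(action.get("priority", "P4_LOW"), 5) — the sort key of A / bucket rank of B
def pvRank (action : List (String × String)) : Int :=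
  PySem.Dict.getD
    (PySem.Dict.ofList [("P1_CRITICAL", (1:Int)), ("P2_HIGH", 2), ("P3_MEDIUM", 3), ("P4_LOW", 4)])
    (pvGet action "priority" "P4_LOW") 5

-- ===== PORT A =====
def generate_remediation_text_py (remediation_actions : List (List (String × String))) : String :=
  if remediation_actions = [] then "No remediation required - system is compliant"
  else
    let sorted_actions := PySem.List.sorted remediation_actions (fun x => pvRank x) false
    let text :=
      ((PySem.List.slice sorted_actions none (some 5)).foldl
        (fun (st : Int × String) action =>
          let priority := pvGet action "priority" ""
          let description := pvGet action "description" ""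
          let timeline := pvGet action "timeline" ""
          let t := st.2 ++ PySem.Int.toStr st.1 ++ ". [" ++ priority ++ "] " ++ description
          let t := if timeline ≠ "" then t ++ " (Timeline: " ++ timeline ++ ")" else t
          (st.1 + 1, t ++ "\n"))
        (1, "Remediation Required:\n")).2
    let text :=
      if (remediation_actions.length : Int) > 5 then
        text ++ "... and " ++ PySem.Int.toStr ((remediation_actions.length : Int) - 5) ++ " more actions\n"
      else text
    PySem.Str.strip text

-- ===== PORT B =====
-- B's bucket-loop body: append the action to the bucket of its rank
def pvBucketStep
    (st : List (List (String × String)) × List (List (String × String)) ×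
          List (List (String × String)) × List (List (String × String)) ×
          List (List (String × String))) (action : List (String × String)) :
    List (List (String × String)) × List (List (String × String)) ×
    List (List (String × String)) × List (List (String × String)) ×
    List (List (String × String)) :=
  let rank := pvRank action
  if rank == 1 then (st.1 ++ [action], st.2.1, st.2.2.1, st.2.2.2.1, st.2.2.2.2)
  else if rank == 2 then (st.1, st.2.1 ++ [action], st.2.2.1, st.2.2.2.1, st.2.2.2.2)
  else if rank == 3 then (st.1, st.2.1, st.2.2.1 ++ [action], st.2.2.2.1, st.2.2.2.2)
  else if rank == 4 then (st.1, st.2.1, st.2.2.1, st.2.2.2.1 ++ [action], st.2.2.2.2)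
  else (st.1, st.2.1, st.2.2.1, st.2.2.2.1, st.2.2.2.2 ++ [action])

-- B's format_line helper
def pvFmtLine (i : Int) (action : List (String × String)) : String :=
  let line := PySem.Int.toStr i ++ ". [" ++ pvGet action "priority" "" ++ "] " ++ pvGet action "description" ""
  let timeline := pvGet action "timeline" ""
  let line := if timeline ≠ "" then line ++ " (Timeline: " ++ timeline ++ ")" else line
  line ++ "\n"

def generate_remediation_text_py_alt (remediation_actions : List (List (String × String))) : String :=
  if remediation_actions = [] then "No remediation required - system is compliant"
  else
    let bs := remediation_actions.foldl pvBucketStep ([], [], [], [], [])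
    let ordered := bs.1 ++ bs.2.1 ++ bs.2.2.1 ++ bs.2.2.2.1 ++ bs.2.2.2.2
    let lines := (PySem.List.enumerate (PySem.List.slice ordered none (some 5)) 1).map
      (fun p => pvFmtLine p.1 p.2)
    let text := "Remediation Required:\n" ++ String.join lines
    let text :=
      if (remediation_actions.length : Int) > 5 then
        text ++ "... and " ++ PySem.Int.toStr ((remediation_actions.length : Int) - 5) ++ " more actions\n"
      else text
    PySem.Str.strip text

-- ===== PRECONDITION & SPEC =====
def Spec_generate_remediation_text_py (remediation_actions : List (List (String × String))) (out : String) : Prop := out = generate_remediation_text_py_alt remediation_actions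
instance (remediation_actions : List (List (String × String))) (out : String) : Decidable (Spec_generate_remediation_text_py remediation_actions out) := by unfold Spec_generate_remediation_text_py; infer_instance

-- ===== CLAIM (what is proved, stated in full; the proofs are below) =====
def Claim_equal_generate_remediation_text_py : Prop := ∀ (remediation_actions : List (List (String × String))), Dom_generate_remediation_text_py remediation_actions → Spec_generate_remediation_text_py remediation_actions (generate_remediation_text_py remediation_actions)

-- ===== LEMMAS AND PROOFS =====

-- the rank is always one of 1..5
lemma pvRank_cases (a : List (String × String)) :
    pvRank a = 1 ∨ pvRank a = 2 ∨ pvRank a = 3 ∨ pvRank a = 4 ∨ pvRank a = 5 := by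
  unfold pvRank
  generalize pvGet a "priority" "P4_LOW" = k
  have hD : PySem.Dict.ofList [("P1_CRITICAL", (1:Int)), ("P2_HIGH", 2), ("P3_MEDIUM", 3), ("P4_LOW", 4)] =
      ({ items := [("P1_CRITICAL", (1:Int)), ("P2_HIGH", 2), ("P3_MEDIUM", 3), ("P4_LOW", 4)] } : PySem.Dict String Int) := by
    rfl
  rw [hD]
  simp only [PySem.Dict.getD, PySem.Dict.get?]
  cases h1 : ("P1_CRITICAL" == k) <;> simp only [List.find?, h1] <;>
    [skip; simp]
  cases h2 : ("P2_HIGH" == k) <;> simp only [h2] <;>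
    [skip; simp]
  cases h3 : ("P3_MEDIUM" == k) <;> simp only [h3] <;>
    [skip; simp]
  cases h4 : ("P4_LOW" == k) <;> simp only [h4] <;> simp

-- inserting x between a prefix it is not-before and a suffix it is before
lemma insertBy_split {α : Type} (before : α → α → Bool) (x : α) (l1 l2 : List α)
    (h1 : ∀ y ∈ l1, before x y = false) (h2 : ∀ y ∈ l2, before x y = true) :
    PySem.List.insertBy before x (l1 ++ l2) = l1 ++ x :: l2 := by
  induction l1 with
  | nil =>
    cases l2 with
    | nil => rfl
    | cons z zs => simp [PySem.List.insertBy, h2 z (by simp)]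
  | cons a l1' ih =>
    have ha := h1 a (by simp)
    simp [PySem.List.insertBy, ha]
    exact ih (fun y hy => h1 y (by simp [hy]))

-- F r xs: the bucket of rank r
def pvBucket (r : Int) (xs : List (List (String × String))) : List (List (String × String)) :=
  xs.filter (fun a => pvRank a == r)

lemma mem_pvBucket {r : Int} {xs : List (List (String × String))} {y : List (String × String)}
    (h : y ∈ pvBucket r xs) : pvRank y = r := by
  have := List.of_mem_filter h
  simpa using this

-- stable sort by rank = concatenation of the five buckets
lemma sorted_eq_buckets (xs : List (List (String × String))) :
    PySem.List.sorted xs (fun x => pvRank x) false =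
      pvBucket 1 xs ++ pvBucket 2 xs ++ pvBucket 3 xs ++ pvBucket 4 xs ++ pvBucket 5 xs := by
  induction xs using List.reverseRecOn with
  | nil => rfl
  | append_singleton xs x ih =>
    have hfold : PySem.List.sorted (xs ++ [x]) (fun x => pvRank x) false =
        PySem.List.insertBy (fun a b => decide (pvRank a < pvRank b)) x
          (PySem.List.sorted xs (fun x => pvRank x) false) := by
      rw [PySem.List.sorted_eq_foldl_insertBy, PySem.List.sorted_eq_foldl_insertBy,
        List.foldl_append]
      rfl
    rw [hfold, ih]
    have hbk : ∀ (r : Int), pvBucket r (xs ++ [x]) =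
        pvBucket r xs ++ (if pvRank x = r then [x] else []) := by
      intro r
      simp [pvBucket, List.filter_append]
      split_ifs with h <;> simp [h]
    rcases pvRank_cases x with h | h | h | h | h
    · rw [show pvBucket 1 xs ++ pvBucket 2 xs ++ pvBucket 3 xs ++ pvBucket 4 xs ++ pvBucket 5 xs =
          pvBucket 1 xs ++ (pvBucket 2 xs ++ pvBucket 3 xs ++ pvBucket 4 xs ++ pvBucket 5 xs) by
          simp [List.append_assoc]]
      rw [insertBy_split _ x _ _
        (by intro y hy; have := mem_pvBucket hy; simp [this, h])
        (by intro y hy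
            simp only [List.append_assoc, List.mem_append] at hy
            rcases hy with hy | hy | hy | hy <;>
              · have := mem_pvBucket hy; simp [this, h])]
      simp [hbk, h, List.append_assoc]
    · rw [show pvBucket 1 xs ++ pvBucket 2 xs ++ pvBucket 3 xs ++ pvBucket 4 xs ++ pvBucket 5 xs =
          (pvBucket 1 xs ++ pvBucket 2 xs) ++ (pvBucket 3 xs ++ pvBucket 4 xs ++ pvBucket 5 xs) by
          simp [List.append_assoc]]
      rw [insertBy_split _ x _ _
        (by intro y hy
            simp only [List.mem_append] at hy
            rcases hy with hy | hy <;> · have := mem_pvBucket hy; simp [this, h])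
        (by intro y hy
            simp only [List.append_assoc, List.mem_append] at hy
            rcases hy with hy | hy | hy <;>
              · have := mem_pvBucket hy; simp [this, h])]
      simp [hbk, h, List.append_assoc]
    · rw [show pvBucket 1 xs ++ pvBucket 2 xs ++ pvBucket 3 xs ++ pvBucket 4 xs ++ pvBucket 5 xs =
          (pvBucket 1 xs ++ pvBucket 2 xs ++ pvBucket 3 xs) ++ (pvBucket 4 xs ++ pvBucket 5 xs) by
          simp [List.append_assoc]]
      rw [insertBy_split _ x _ _
        (by intro y hy
            simp only [List.append_assoc, List.mem_append] at hy
            rcases hy with hy | hy | hy <;> · have := mem_pvBucket hy; simp [this, h])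
        (by intro y hy
            simp only [List.mem_append] at hy
            rcases hy with hy | hy <;> · have := mem_pvBucket hy; simp [this, h])]
      simp [hbk, h, List.append_assoc]
    · rw [show pvBucket 1 xs ++ pvBucket 2 xs ++ pvBucket 3 xs ++ pvBucket 4 xs ++ pvBucket 5 xs =
          (pvBucket 1 xs ++ pvBucket 2 xs ++ pvBucket 3 xs ++ pvBucket 4 xs) ++ pvBucket 5 xs by
          simp [List.append_assoc]]
      rw [insertBy_split _ x _ _
        (by intro y hy
            simp only [List.append_assoc, List.mem_append] at hy
            rcases hy with hy | hy | hy | hy <;> · have := mem_pvBucket hy; simp [this, h])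
        (by intro y hy; have := mem_pvBucket hy; simp [this, h])]
      simp [hbk, h, List.append_assoc]
    · rw [PySem.List.insertBy_of_forall_not_before _ x _
        (by intro y hy
            simp only [List.append_assoc, List.mem_append] at hy
            rcases hy with hy | hy | hy | hy | hy <;>
              · have := mem_pvBucket hy; simp [this, h])]
      simp [hbk, h, List.append_assoc]

-- the step written with propositional tests, for case analysis
lemma pvBucketStep_rank (a1 a2 a3 a4 a5 : List (List (String × String)))
    (x : List (String × String)) :
    pvBucketStep (a1, a2, a3, a4, a5) x =
    if pvRank x = 1 then (a1 ++ [x], a2, a3, a4, a5)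
    else if pvRank x = 2 then (a1, a2 ++ [x], a3, a4, a5)
    else if pvRank x = 3 then (a1, a2, a3 ++ [x], a4, a5)
    else if pvRank x = 4 then (a1, a2, a3, a4 ++ [x], a5)
    else (a1, a2, a3, a4, a5 ++ [x]) := by
  simp [pvBucketStep]

-- the bucket fold of B computes the five filters
lemma buckets_foldl (xs : List (List (String × String)))
    (a1 a2 a3 a4 a5 : List (List (String × String))) :
    xs.foldl pvBucketStep (a1, a2, a3, a4, a5) =
    (a1 ++ pvBucket 1 xs, a2 ++ pvBucket 2 xs, a3 ++ pvBucket 3 xs,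
     a4 ++ pvBucket 4 xs, a5 ++ xs.filter (fun a => ¬(pvRank a = 1 ∨ pvRank a = 2 ∨ pvRank a = 3 ∨ pvRank a = 4))) := by
  induction xs generalizing a1 a2 a3 a4 a5 with
  | nil => simp [pvBucket]
  | cons x xs ih =>
    rw [List.foldl_cons, pvBucketStep_rank]
    rcases pvRank_cases x with h | h | h | h | h <;>
      · simp only [h]
        norm_num
        rw [ih]
        simp [pvBucket, h, List.append_assoc]

-- elements of rank outside 1..4 have rank 5, so B's last bucket is the rank-5 filter
lemma last_bucket_eq (xs : List (List (String × String))) :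
    xs.filter (fun a => ¬(pvRank a = 1 ∨ pvRank a = 2 ∨ pvRank a = 3 ∨ pvRank a = 4)) =
      pvBucket 5 xs := by
  unfold pvBucket
  apply List.filter_congr
  intro a _
  rcases pvRank_cases a with h | h | h | h | h <;> simp [h]

-- A's counting fold of formatted lines = the joined map over enumerate (B's shape)
lemma foldl_fmt_eq_join (l : List (List (String × String))) (i : Int) (init : String) :
    (l.foldl (fun (st : Int × String) action => (st.1 + 1, st.2 ++ pvFmtLine st.1 action))
      (i, init)).2 =
    init ++ String.join ((PySem.List.enumerate l i).map (fun p => pvFmtLine p.1 p.2)) := by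
  induction l generalizing i init with
  | nil => simp [PySem.List.enumerate, String.join]
  | cons a l ih =>
    rw [PySem.List.enumerate_cons]
    simp only [List.foldl_cons, List.map_cons]
    rw [ih]
    have : ∀ (s t : String) (ls : List String),
        String.join (t :: ls) = t ++ String.join ls := by
      intro s t ls
      show List.foldl (· ++ ·) "" (t :: ls) = t ++ List.foldl (· ++ ·) "" ls
      simp only [List.foldl_cons]
      have aux : ∀ (ls : List String) (u : String),
          List.foldl (· ++ ·) u ls = u ++ List.foldl (· ++ ·) "" ls := by
        intro ls
        induction ls with
        | nil => intro u; simp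
        | cons b ls ihb =>
          intro u
          simp only [List.foldl_cons]
          rw [ihb, ihb ("" ++ b), String.append_assoc]
          simp
      rw [aux]
      simp
    rw [this "" (pvFmtLine i a), String.append_assoc]

-- A's loop body, rewritten as appending one formatted line
lemma bodyA_eq (st : Int × String) (action : List (String × String)) :
    (let priority := pvGet action "priority" ""
     let description := pvGet action "description" ""
     let timeline := pvGet action "timeline" ""
     let t := st.2 ++ PySem.Int.toStr st.1 ++ ". [" ++ priority ++ "] " ++ description
     let t := if timeline ≠ "" then t ++ " (Timeline: " ++ timeline ++ ")" else t
     ((st.1 + 1 : Int), t ++ "\n")) =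
    (st.1 + 1, st.2 ++ pvFmtLine st.1 action) := by
  simp only [pvFmtLine]
  split_ifs with h <;> simp [String.append_assoc]

-- ===== VERDICT (by name: the statement is the Claim_ definition above) =====
theorem generate_remediation_text_py_spec : Claim_equal_generate_remediation_text_py := by
  unfold Claim_equal_generate_remediation_text_py
  intro ras _
  unfold Spec_generate_remediation_text_py
  unfold generate_remediation_text_py generate_remediation_text_py_alt
  by_cases hnil : ras = []
  · simp [hnil]
  · simp only [hnil, if_false]
    rw [buckets_foldl ras [] [] [] [] [], last_bucket_eq]
    simp only [List.nil_append]
    rw [← sorted_eq_buckets ras]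
    congr 1
    have hfold :
        ((PySem.List.slice (PySem.List.sorted ras (fun x => pvRank x) false) none (some 5)).foldl
          (fun (st : Int × String) action =>
            let priority := pvGet action "priority" ""
            let description := pvGet action "description" ""
            let timeline := pvGet action "timeline" ""
            let t := st.2 ++ PySem.Int.toStr st.1 ++ ". [" ++ priority ++ "] " ++ description
            let t := if timeline ≠ "" then t ++ " (Timeline: " ++ timeline ++ ")" else t
            (st.1 + 1, t ++ "\n"))
          (1, "Remediation Required:\n")).2 =
        "Remediation Required:\n" ++
          String.join ((PySem.List.enumerate
            (PySem.List.slice (PySem.List.sorted ras (fun x => pvRank x) false) none (some 5)) 1).map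
            (fun p => pvFmtLine p.1 p.2)) := by
      rw [show (fun (st : Int × String) action =>
            let priority := pvGet action "priority" ""
            let description := pvGet action "description" ""
            let timeline := pvGet action "timeline" ""
            let t := st.2 ++ PySem.Int.toStr st.1 ++ ". [" ++ priority ++ "] " ++ description
            let t := if timeline ≠ "" then t ++ " (Timeline: " ++ timeline ++ ")" else t
            ((st.1 + 1 : Int), t ++ "\n")) =
          (fun (st : Int × String) action => (st.1 + 1, st.2 ++ pvFmtLine st.1 action)) by
        funext st action; exact bodyA_eq st action]
      exact foldl_fmt_eq_join _ 1 _
    rw [hfold]
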